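-- pv_equiv track=rewrite | github.com/husnainalix77/HusnainPythonPortfolio | Flames-Game/flames_game.py | removeSameChar
-- ===== SOURCE A (Python) =====
-- def removeSameChar(name1, name2):
--     'Removes same characters which are in both names'
--     name1_list = list(name1)
--     name2_list = list(name2)
--
--     for ch in name1_list[:]: ## Shallow copy is needed while iterating with removing elements
--         if ch in name2_list:
--             name1_list.remove(ch)
--             name2_list.remove(ch)
--
--     return len(name1_list+name2_list)
-- ===== SOURCE B (Python) =====
-- def removeSameChar(name1, name2):
--     'Removes same characters which are in both names'
--     m = 0
--     for ch in set(name1):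
--         m += min(name1.count(ch), name2.count(ch))
--     return len(name1) + len(name2) - 2 * m
-- ===== Notes on version B (the rewrite author's own statement) =====
-- stated objective: faster
-- what changed: Replaces the destructive scan-and-remove over two mutating lists by a single counting pass: the number of removed pairs is computed as the sum over distinct characters of min(count in name1, count in name2), then returned as len1+len2-2*m.
import Mathlib
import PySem

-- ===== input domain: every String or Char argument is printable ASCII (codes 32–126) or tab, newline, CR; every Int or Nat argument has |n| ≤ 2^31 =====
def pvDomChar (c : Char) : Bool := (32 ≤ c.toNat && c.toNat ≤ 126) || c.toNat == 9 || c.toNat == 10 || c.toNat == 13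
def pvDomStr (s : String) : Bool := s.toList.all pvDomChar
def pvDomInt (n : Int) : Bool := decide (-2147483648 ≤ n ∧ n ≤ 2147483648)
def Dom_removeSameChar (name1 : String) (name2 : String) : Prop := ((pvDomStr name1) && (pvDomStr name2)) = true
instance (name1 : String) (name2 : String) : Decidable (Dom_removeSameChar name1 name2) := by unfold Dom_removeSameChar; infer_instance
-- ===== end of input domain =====

-- B replaces A's quadratic scan-and-remove over two mutating lists by one counting
-- pass (m = Σ over distinct chars of min of the two counts); return value only, A's
-- list mutations are local to A.

-- ===== PORT A =====
-- list.remove is PySem.List.remove?; the `.getD` default is never taken: the branch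
-- test guarantees ch ∈ name2_list, and ch ∈ name1_list by the count invariant proved below.
def removeSameChar (name1 : String) (name2 : String) : Int :=
  let name1List := name1.toList
  let name2List := name2.toList
  let p := (PySem.List.slice name1List none none).foldl
    (fun (st : List Char × List Char) ch =>
      if st.2.contains ch then
        ((PySem.List.remove? st.1 ch).getD st.1, (PySem.List.remove? st.2 ch).getD st.2)
      else st)
    (name1List, name2List)
  ((p.1 ++ p.2).length : Int)

-- ===== PORT B =====
-- set(name1) is PySem.Set.ofList; the sum over it is iteration-order independent.
def removeSameChar_alt (name1 : String) (name2 : String) : Int :=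
  let xs := name1.toList
  let ys := name2.toList
  let m : Int := (PySem.Set.ofList xs).foldl
    (fun acc ch => acc + min ((PySem.List.count xs ch : Int)) ((PySem.List.count ys ch : Int))) 0
  (xs.length : Int) + (ys.length : Int) - 2 * m

-- ===== PRECONDITION & SPEC =====
def Spec_removeSameChar (name1 : String) (name2 : String) (out : Int) : Prop := out = removeSameChar_alt name1 name2
instance (name1 : String) (name2 : String) (out : Int) : Decidable (Spec_removeSameChar name1 name2 out) := by unfold Spec_removeSameChar; infer_instance

-- ===== CLAIM (what is proved, stated in full; the proofs are below) =====
def Claim_equal_removeSameChar : Prop := ∀ (name1 : String) (name2 : String), Dom_removeSameChar name1 name2 → Spec_removeSameChar name1 name2 (removeSameChar name1 name2)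

-- ===== LEMMAS AND PROOFS =====

-- number of matched pairs of A's loop: process zs left to right against a shrinking l2
def pvMatch : List Char → List Char → Nat
  | [], _ => 0
  | c :: t, l2 => if l2.contains c then pvMatch t (l2.erase c) + 1 else pvMatch t l2

lemma pv_remove_getD {xs : List Char} {v : Char} (h : v ∈ xs) :
    (PySem.List.remove? xs v).getD xs = xs.erase v := by
  simp [PySem.List.remove?_eq_some_erase xs v h]

-- A's loop invariant: as long as the remaining iteration list zs is count-dominated by l1,
-- the final total length is len l1 + len l2 - 2 * (number of matches).
lemma pv_foldA (zs : List Char) : ∀ (l1 l2 : List Char),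
    (∀ c, zs.count c ≤ l1.count c) →
    (((zs.foldl
      (fun (st : List Char × List Char) ch =>
        if st.2.contains ch then
          ((PySem.List.remove? st.1 ch).getD st.1, (PySem.List.remove? st.2 ch).getD st.2)
        else st)
      (l1, l2)).1.length : Int))
      + ((zs.foldl
      (fun (st : List Char × List Char) ch =>
        if st.2.contains ch then
          ((PySem.List.remove? st.1 ch).getD st.1, (PySem.List.remove? st.2 ch).getD st.2)
        else st)
      (l1, l2)).2.length : Int)
    = (l1.length : Int) + (l2.length : Int) - 2 * (pvMatch zs l2 : Int) := by
  induction zs with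
  | nil => intro l1 l2 _; simp [pvMatch]
  | cons c t ih =>
    intro l1 l2 h
    have hc1 : c ∈ l1 := by
      have := h c
      rw [List.count_cons_self] at this
      exact List.count_pos_iff.mp (by omega)
    by_cases hc2 : l2.contains c
    · have hc2' : c ∈ l2 := by simpa using hc2
      simp only [List.foldl_cons, hc2, if_true, pvMatch]
      rw [pv_remove_getD hc1, pv_remove_getD hc2']
      have ih' := ih (l1.erase c) (l2.erase c) (by
        intro b
        by_cases hbc : b = c
        · subst hbc
          have := h b
          rw [List.count_erase_self]
          rw [List.count_cons_self] at this
          omega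
        · have := h b
          rw [List.count_erase_of_ne hbc]
          exact le_trans List.count_le_count_cons this)
      rw [ih']
      have h1 : (l1.erase c).length = l1.length - 1 := List.length_erase_of_mem hc1
      have h2 : (l2.erase c).length = l2.length - 1 := List.length_erase_of_mem hc2'
      have hl1 : 1 ≤ l1.length := List.length_pos_of_mem hc1
      have hl2 : 1 ≤ l2.length := List.length_pos_of_mem hc2'
      rw [h1, h2]
      push_cast [hl1, hl2]
      ring
    · simp only [List.foldl_cons, hc2, if_false, Bool.false_eq_true, pvMatch]
      exact ih l1 l2 (by
        intro b
        exact le_trans List.count_le_count_cons (h b))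

-- the match count is the cardinality of the multiset intersection
lemma pv_match_inter (zs : List Char) : ∀ (l2 : List Char),
    pvMatch zs l2 = Multiset.card ((zs : Multiset Char) ∩ (l2 : Multiset Char)) := by
  induction zs with
  | nil => intro l2; simp [pvMatch]
  | cons c t ih =>
    intro l2
    by_cases hc : c ∈ l2
    · have hinter : (↑(c :: t) : Multiset Char) ∩ ↑l2 = c ::ₘ ((↑t : Multiset Char) ∩ (↑l2 : Multiset Char).erase c) := by
        exact Multiset.cons_inter_of_pos (↑t : Multiset Char) (by simpa using hc)
      simp only [pvMatch]
      rw [if_pos (by simpa using hc), hinter]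
      simp [ih (l2.erase c), Multiset.coe_erase]
    · have hinter : (↑(c :: t) : Multiset Char) ∩ ↑l2 = (↑t : Multiset Char) ∩ (↑l2 : Multiset Char) := by
        exact Multiset.cons_inter_of_neg (↑t : Multiset Char) (by simpa using hc)
      simp only [pvMatch]
      rw [if_neg (by simpa using hc), hinter, ih l2]

-- B's sum of mins is the same cardinality
lemma pv_sum_min (xs ys : List Char) :
    ((PySem.Set.ofList xs).foldl
      (fun acc ch => acc + min ((PySem.List.count xs ch : Int)) ((PySem.List.count ys ch : Int))) 0)
    = (Multiset.card ((xs : Multiset Char) ∩ (ys : Multiset Char)) : Int) := by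
  rw [PySem.List.foldl_add
      (g := fun ch => min ((PySem.List.count xs ch : Int)) ((PySem.List.count ys ch : Int))), zero_add]
  have hofl : (PySem.Set.ofList xs : List Char) = PySem.List.dedup xs :=
    (PySem.List.dedup_eq_ofList xs).symm
  rw [hofl]
  have hnd : (PySem.List.dedup xs).Nodup := PySem.List.nodup_dedup xs
  have hsum : ((PySem.List.dedup xs).map
      (fun ch => min ((PySem.List.count xs ch : Int)) ((PySem.List.count ys ch : Int)))).sum
      = ∑ a ∈ (PySem.List.dedup xs).toFinset,
          min ((PySem.List.count xs a : Int)) ((PySem.List.count ys a : Int)) :=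
    (List.sum_toFinset _ hnd).symm
  have hfs : (PySem.List.dedup xs).toFinset = xs.toFinset := by
    ext a; simp [List.mem_toFinset]
  rw [hsum, hfs]
  have hcount : ∀ a : Char, min ((PySem.List.count xs a : Int)) ((PySem.List.count ys a : Int))
      = (Multiset.count a ((xs : Multiset Char) ∩ (ys : Multiset Char)) : Int) := by
    intro a
    rw [Multiset.count_inter]
    simp [PySem.List.count_eq, Nat.cast_min]
  calc ∑ a ∈ xs.toFinset, min ((PySem.List.count xs a : Int)) ((PySem.List.count ys a : Int))
      = ∑ a ∈ xs.toFinset, (Multiset.count a ((xs : Multiset Char) ∩ (ys : Multiset Char)) : Int) := by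
        exact Finset.sum_congr rfl (fun a _ => hcount a)
    _ = ((∑ a ∈ xs.toFinset, Multiset.count a ((xs : Multiset Char) ∩ (ys : Multiset Char)) : Nat) : Int) := by
        push_cast; ring
    _ = (Multiset.card ((xs : Multiset Char) ∩ (ys : Multiset Char)) : Int) := by
        congr 1
        rw [← Multiset.toFinset_sum_count_eq ((xs : Multiset Char) ∩ (ys : Multiset Char))]
        refine (Finset.sum_subset ?_ ?_).symm
        · intro a ha
          rw [Multiset.mem_toFinset, Multiset.mem_inter] at ha
          rw [List.mem_toFinset]
          simpa using ha.1
        · intro a _ ha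
          have : a ∉ ((xs : Multiset Char) ∩ (ys : Multiset Char)) := by
            simpa using ha
          exact Multiset.count_eq_zero.mpr this

-- ===== VERDICT (by name: the statement is the Claim_ definition above) =====
theorem removeSameChar_spec : Claim_equal_removeSameChar := by
  intro name1 name2 _
  unfold Spec_removeSameChar removeSameChar removeSameChar_alt
  simp only [PySem.List.slice_none_none, List.length_append]
  have hA := pv_foldA name1.toList name1.toList name2.toList (fun c => le_refl _)
  have hM := pv_match_inter name1.toList name2.toList
  have hB := pv_sum_min name1.toList name2.toList
  push_cast
  rw [hA, hM, hB]
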